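-- pv_equiv track=rewrite | github.com/Olli0103/Quartz | scripts/lib/relationship_updates.py | select_best_bullets
-- ===== SOURCE A (Python) =====
-- def select_best_bullets(candidates: list[tuple[int, str]], limit: int = 3) -> list[str]:
--     ordered = sorted(candidates, key=lambda item: (-item[0], item[1].casefold()))
--     seen: set[str] = set()
--     results: list[str] = []
--     for _, text in ordered:
--         key = text.casefold()
--         if key in seen:
--             continue
--         seen.add(key)
--         results.append(text)
--         if len(results) >= limit:
--             break
--     return results
-- ===== SOURCE B (Python) =====
-- def select_best_bullets(candidates: list[tuple[int, str]], limit: int = 3) -> list[str]: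
--     # One pass grouping by casefolded text: keep the highest-scoring candidate per key
--     # (first seen wins ties), then sort the unique representatives once.
--     best: dict[str, tuple[int, str]] = {}
--     for score, text in candidates:
--         key = text.casefold()
--         prev = best.get(key)
--         if prev is None or prev[0] < score:
--             best[key] = (score, text)
--     ranked = sorted(best.values(), key=lambda item: (-item[0], item[1].casefold()))
--     results: list[str] = []
--     for _, text in ranked:
--         results.append(text)
--         if len(results) >= limit:
--             break
--     return results
-- ===== Notes on version B (the rewrite author's own statement) =====
-- stated objective: alternative
-- what changed: Instead of sorting all candidates and then deduplicating with a seen-set, B makes one dict-building pass grouping candidates by casefolded text (keeping the highest-scoring, first-seen representative per key) and sorts only the unique representatives, keeping the same append-then-break output loop.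
import Mathlib
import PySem

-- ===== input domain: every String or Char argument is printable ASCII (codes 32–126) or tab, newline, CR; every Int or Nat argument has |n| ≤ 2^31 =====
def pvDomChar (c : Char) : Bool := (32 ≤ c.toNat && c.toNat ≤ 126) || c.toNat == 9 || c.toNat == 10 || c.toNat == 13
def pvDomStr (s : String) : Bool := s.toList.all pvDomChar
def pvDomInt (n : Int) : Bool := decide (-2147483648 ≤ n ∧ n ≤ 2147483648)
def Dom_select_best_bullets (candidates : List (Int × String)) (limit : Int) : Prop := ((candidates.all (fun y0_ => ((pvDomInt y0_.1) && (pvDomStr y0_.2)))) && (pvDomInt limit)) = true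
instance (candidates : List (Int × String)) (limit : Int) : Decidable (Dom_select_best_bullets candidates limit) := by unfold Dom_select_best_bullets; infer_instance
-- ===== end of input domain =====

-- B replaces A's sort-everything-then-dedup by a one-pass dict keyed on the casefolded
-- text (keeping the highest-scoring, first-seen representative) followed by one sort of
-- the unique representatives: same return value, a different decomposition.

-- ===== PORT A =====
-- str.casefold, exact on the printable-ASCII domain (where casefold = lower)
def sbbKey (t : String) : String := PySem.Str.lower t

-- A's for-loop over `ordered` with `seen`, `results`, and the post-append break
def sbbLoopA (limit : Int) : List (Int × String) → PySem.Set String → List String → List String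
  | [], _, results => results
  | p :: rest, seen, results =>
    let key := sbbKey p.2
    if PySem.Set.contains seen key then sbbLoopA limit rest seen results
    else
      let seen' := PySem.Set.add seen key
      let results' := results ++ [p.2]
      if limit ≤ (results'.length : Int) then results' else sbbLoopA limit rest seen' results'

def select_best_bullets (candidates : List (Int × String)) (limit : Int) : List String :=
  let ordered := PySem.List.sorted2 candidates (fun item => -item.1) (fun item => sbbKey item.2) false
  sbbLoopA limit ordered PySem.Set.empty []

-- ===== PORT B =====
-- B's grouping pass: best[key] = (score, text) when absent or strictly better
def sbbBest (candidates : List (Int × String)) : PySem.Dict String (Int × String) :=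
  candidates.foldl (fun best p =>
    let key := sbbKey p.2
    match best.get? key with
    | none => best.insert key p
    | some prev => if prev.1 < p.1 then best.insert key p else best) PySem.Dict.empty

-- B's output loop: append, break when len(results) >= limit
def sbbLoopB (limit : Int) : List (Int × String) → List String → List String
  | [], results => results
  | p :: rest, results =>
    let results' := results ++ [p.2]
    if limit ≤ (results'.length : Int) then results' else sbbLoopB limit rest results'

def select_best_bullets_alt (candidates : List (Int × String)) (limit : Int) : List String :=
  let ranked := PySem.List.sorted2 (sbbBest candidates).values (fun item => -item.1) (fun item => sbbKey item.2) false
  sbbLoopB limit ranked []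

-- ===== PRECONDITION & SPEC =====
def Spec_select_best_bullets (candidates : List (Int × String)) (limit : Int) (out : List String) : Prop := out = select_best_bullets_alt candidates limit
instance (candidates : List (Int × String)) (limit : Int) (out : List String) : Decidable (Spec_select_best_bullets candidates limit out) := by unfold Spec_select_best_bullets; infer_instance

-- ===== CLAIM (what is proved, stated in full; the proofs are below) =====
def Claim_equal_select_best_bullets : Prop := ∀ (candidates : List (Int × String)) (limit : Int), Dom_select_best_bullets candidates limit → Spec_select_best_bullets candidates limit (select_best_bullets candidates limit)

-- ===== LEMMAS AND PROOFS =====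

-- the full sort key of both programs, as one lexicographic linear order
def sbbK (p : Int × String) : Lex (Int × String) := toLex (-p.1, sbbKey p.2)

def sbbSorted (l : List (Int × String)) : List (Int × String) := PySem.List.sorted l sbbK false

-- first element per casefold key, given an initial seen set
def sbbDedup : List (Int × String) → PySem.Set String → List (Int × String)
  | [], _ => []
  | p :: rest, seen =>
    if PySem.Set.contains seen (sbbKey p.2) then sbbDedup rest seen
    else p :: sbbDedup rest (PySem.Set.add seen (sbbKey p.2))

-- the per-key "leftmost strict maximum by score" fold (one key's view of sbbBest)
def sbbStep (K : String) (acc : Option (Int × String)) (p : Int × String) : Option (Int × String) :=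
  if sbbKey p.2 = K then
    match acc with
    | none => some p
    | some b => if b.1 < p.1 then some p else acc
  else acc

def sbbBestOf (K : String) (l : List (Int × String)) : Option (Int × String) :=
  l.foldl (sbbStep K) none

theorem before_eq (a b : Int × String) :
    (decide ((-a.1:Int) < -b.1) || (!decide ((-b.1:Int) < -a.1) && decide (sbbKey a.2 < sbbKey b.2)))
      = decide (sbbK a < sbbK b) := by
  rcases lt_trichotomy (-a.1 : Int) (-b.1) with h | h | h
  · simp [sbbK, Prod.Lex.toLex_lt_toLex, h]
  · simp [sbbK, Prod.Lex.toLex_lt_toLex, h]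
  · simp only [sbbK, Prod.Lex.toLex_lt_toLex]
    have h1 : a.1 < b.1 := by omega
    have h2 : ¬ a.1 = b.1 := by omega
    simp [h1, h2]

theorem sorted2_eq_sorted_lex (l : List (Int × String)) :
    PySem.List.sorted2 l (fun item => -item.1) (fun item => sbbKey item.2) false = sbbSorted l := by
  rw [sbbSorted, PySem.List.sorted_eq_foldl_insertBy]
  unfold PySem.List.sorted2
  simp only [Bool.false_eq_true, if_false]
  congr 1
  funext acc x
  congr 1
  funext a b
  exact before_eq a b

theorem setContains_iff (s : PySem.Set String) (x : String) :
    PySem.Set.contains s x = true ↔ x ∈ s := by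
  simp [PySem.Set.contains]

theorem setContains_add (s : PySem.Set String) (x y : String) :
    PySem.Set.contains (PySem.Set.add s x) y = (PySem.Set.contains s y || y == x) := by
  rw [Bool.eq_iff_iff]
  simp only [Bool.or_eq_true, beq_iff_eq, setContains_iff]
  rw [PySem.Set.mem_add]

theorem setAdd_of_contains (s : PySem.Set String) (x : String)
    (h : PySem.Set.contains s x = true) : PySem.Set.add s x = s := by
  simp [PySem.Set.add, PySem.Set.contains] at h ⊢
  simp [h]

theorem loopA_eq_loopB (limit : Int) (l : List (Int × String)) (seen : PySem.Set String) (results : List String) :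
    sbbLoopA limit l seen results = sbbLoopB limit (sbbDedup l seen) results := by
  induction l generalizing seen results with
  | nil => simp [sbbLoopA, sbbLoopB, sbbDedup]
  | cons p rest ih =>
    simp only [sbbLoopA, sbbDedup]
    by_cases hc : PySem.Set.contains seen (sbbKey p.2) = true
    · simp only [hc, if_true]
      exact ih seen results
    · simp only [Bool.not_eq_true] at hc
      simp only [hc, Bool.false_eq_true, if_false, sbbLoopB]
      split_ifs with hl
      · rfl
      · exact ih _ _

theorem mem_sbbDedup_key (l : List (Int × String)) (seen : PySem.Set String) (p : Int × String)
    (h : p ∈ sbbDedup l seen) : PySem.Set.contains seen (sbbKey p.2) = false ∧ p ∈ l := by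
  induction l generalizing seen with
  | nil => simp [sbbDedup] at h
  | cons q rest ih =>
    simp only [sbbDedup] at h
    by_cases hc : PySem.Set.contains seen (sbbKey q.2) = true
    · simp only [hc, if_true] at h
      obtain ⟨h1, h2⟩ := ih _ h
      exact ⟨h1, List.mem_cons_of_mem _ h2⟩
    · simp only [Bool.not_eq_true] at hc
      simp only [hc, Bool.false_eq_true, if_false, List.mem_cons] at h
      rcases h with rfl | h
      · exact ⟨hc, List.mem_cons_self⟩
      · obtain ⟨h1, h2⟩ := ih _ h
        rw [setContains_add, Bool.or_eq_false_iff] at h1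
        exact ⟨h1.1, List.mem_cons_of_mem _ h2⟩

theorem nodup_map_key_sbbDedup (l : List (Int × String)) (seen : PySem.Set String) :
    ((sbbDedup l seen).map (fun p => sbbKey p.2)).Nodup := by
  induction l generalizing seen with
  | nil => simp [sbbDedup]
  | cons q rest ih =>
    simp only [sbbDedup]
    by_cases hc : PySem.Set.contains seen (sbbKey q.2) = true
    · simp only [hc, if_true]; exact ih _
    · simp only [Bool.not_eq_true] at hc
      simp only [hc, Bool.false_eq_true, if_false, List.map_cons, List.nodup_cons]
      refine ⟨?_, ih _⟩
      intro hmem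
      obtain ⟨r, hr, hkey⟩ := List.mem_map.mp hmem
      obtain ⟨h1, _⟩ := mem_sbbDedup_key _ _ _ hr
      rw [setContains_add, Bool.or_eq_false_iff] at h1
      exact absurd (beq_iff_eq.mpr hkey) (by simp [h1.2])

theorem sublist_sbbDedup (l : List (Int × String)) (seen : PySem.Set String) :
    (sbbDedup l seen).Sublist l := by
  induction l generalizing seen with
  | nil => simp [sbbDedup]
  | cons q rest ih =>
    simp only [sbbDedup]
    by_cases hc : PySem.Set.contains seen (sbbKey q.2) = true
    · simp only [hc, if_true]; exact (ih _).cons _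
    · simp only [Bool.not_eq_true] at hc
      simp only [hc, Bool.false_eq_true, if_false]
      exact (ih _).cons₂ _

theorem sbbDedup_congr (l : List (Int × String)) (s₁ s₂ : PySem.Set String)
    (h : ∀ k, PySem.Set.contains s₁ k = PySem.Set.contains s₂ k) :
    sbbDedup l s₁ = sbbDedup l s₂ := by
  induction l generalizing s₁ s₂ with
  | nil => simp [sbbDedup]
  | cons q rest ih =>
    simp only [sbbDedup, h]
    by_cases hc : PySem.Set.contains s₂ (sbbKey q.2) = true
    · simp only [hc, if_true]; exact ih _ _ h
    · simp only [Bool.not_eq_true] at hc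
      simp only [hc, Bool.false_eq_true, if_false]
      congr 1
      exact ih _ _ (fun k => by rw [setContains_add, setContains_add, h])

theorem sbbDedup_add (l : List (Int × String)) (s : PySem.Set String) (k : String) :
    sbbDedup l (PySem.Set.add s k) = (sbbDedup l s).filter (fun q => !(sbbKey q.2 == k)) := by
  induction l generalizing s with
  | nil => simp [sbbDedup]
  | cons q rest ih =>
    by_cases hq : PySem.Set.contains s (sbbKey q.2) = true
    · have hq' : PySem.Set.contains (PySem.Set.add s k) (sbbKey q.2) = true := by
        rw [setContains_add, hq, Bool.true_or]
      simp only [sbbDedup, hq, hq', if_true]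
      exact ih _
    · simp only [Bool.not_eq_true] at hq
      by_cases hk : sbbKey q.2 = k
      · subst hk
        have hq' : PySem.Set.contains (PySem.Set.add s (sbbKey q.2)) (sbbKey q.2) = true := by
          rw [setContains_add, hq, Bool.false_or, beq_iff_eq]
        simp only [sbbDedup, hq, hq', if_true, Bool.false_eq_true, if_false,
          List.filter_cons, BEq.rfl, Bool.not_true]
        symm
        apply List.filter_eq_self.mpr
        intro a ha
        obtain ⟨h1, _⟩ := mem_sbbDedup_key _ _ _ ha
        rw [setContains_add, Bool.or_eq_false_iff] at h1
        simpa using h1.2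
      · have hq' : PySem.Set.contains (PySem.Set.add s k) (sbbKey q.2) = false := by
          rw [setContains_add, hq, Bool.false_or, beq_eq_false_iff_ne]; exact hk
        simp only [sbbDedup, hq, hq', Bool.false_eq_true, if_false, List.filter_cons]
        have : (!(sbbKey q.2 == k)) = true := by simp [hk]
        rw [this]
        congr 1
        rw [sbbDedup_congr rest _ (PySem.Set.add (PySem.Set.add s (sbbKey q.2)) k)
          (fun j => by rw [setContains_add, setContains_add, setContains_add, setContains_add]; ac_rfl)]
        exact ih _

theorem sbbDedup_append (u v : List (Int × String)) (s : PySem.Set String) :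
    sbbDedup (u ++ v) s = sbbDedup u s ++ sbbDedup v (u.foldl (fun s q => PySem.Set.add s (sbbKey q.2)) s) := by
  induction u generalizing s with
  | nil => simp [sbbDedup]
  | cons q u ih =>
    simp only [List.cons_append, sbbDedup, List.foldl_cons]
    by_cases hq : PySem.Set.contains s (sbbKey q.2) = true
    · simp only [hq, if_true, setAdd_of_contains s _ hq]
      exact ih _
    · simp only [Bool.not_eq_true] at hq
      simp only [hq, Bool.false_eq_true, if_false, List.cons_append]
      congr 1
      exact ih _

theorem lex_score_le (a b : Int × String) (hk : sbbKey a.2 = sbbKey b.2)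
    (h : sbbK a ≤ sbbK b) : b.1 ≤ a.1 := by
  rcases Prod.Lex.toLex_le_toLex.mp h with h' | ⟨h', _⟩ <;> omega

theorem lex_score_lt (a b : Int × String) (hk : sbbKey a.2 = sbbKey b.2)
    (h : sbbK a < sbbK b) : b.1 < a.1 := by
  rcases Prod.Lex.toLex_lt_toLex.mp h with h' | ⟨_, h'⟩
  · omega
  · rw [hk] at h'
    exact absurd h' (lt_irrefl _)

theorem sbbStep_eq_none_iff (K : String) (p : Int × String) (acc : Option (Int × String)) :
    sbbStep K acc p = none ↔ acc = none ∧ sbbKey p.2 ≠ K := by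
  cases acc <;> by_cases hk : sbbKey p.2 = K <;>
    simp [sbbStep, hk] <;> split_ifs <;> simp

theorem sbbStep_eq_some (K : String) (p : Int × String) (acc : Option (Int × String))
    (b : Int × String) (h : sbbStep K acc p = some b) :
    acc = some b ∨ (b = p ∧ sbbKey p.2 = K) := by
  by_cases hk : sbbKey p.2 = K
  · cases acc with
    | none =>
      simp [sbbStep, hk] at h
      exact Or.inr ⟨h.symm, hk⟩
    | some c =>
      simp only [sbbStep, hk, if_true] at h
      split_ifs at h
      · exact Or.inr ⟨(Option.some_inj.mp h).symm, hk⟩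
      · exact Or.inl h
  · simp [sbbStep, hk] at h
    exact Or.inl (by rw [h])

theorem foldl_sbbStep_none_iff (K : String) (l : List (Int × String)) (acc : Option (Int × String)) :
    l.foldl (sbbStep K) acc = none ↔ acc = none ∧ ∀ q ∈ l, sbbKey q.2 ≠ K := by
  induction l generalizing acc with
  | nil => simp
  | cons p rest ih =>
    simp only [List.foldl_cons, ih, sbbStep_eq_none_iff, List.mem_cons]
    constructor
    · rintro ⟨⟨h1, h2⟩, h3⟩
      exact ⟨h1, fun q hq => hq.elim (fun h => h ▸ h2) (h3 q)⟩
    · rintro ⟨h1, h2⟩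
      exact ⟨⟨h1, h2 p (Or.inl rfl)⟩, fun q hq => h2 q (Or.inr hq)⟩

theorem foldl_sbbStep_some_mem (K : String) (l : List (Int × String)) (acc : Option (Int × String))
    (b : Int × String) (h : l.foldl (sbbStep K) acc = some b) :
    acc = some b ∨ (b ∈ l ∧ sbbKey b.2 = K) := by
  induction l generalizing acc with
  | nil => exact Or.inl (by simpa using h)
  | cons p rest ih =>
    simp only [List.foldl_cons] at h
    rcases ih _ h with h' | ⟨h1, h2⟩
    · rcases sbbStep_eq_some K p acc b h' with h'' | ⟨rfl, hk⟩
      · exact Or.inl h''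
      · exact Or.inr ⟨List.mem_cons_self, hk⟩
    · exact Or.inr ⟨List.mem_cons_of_mem _ h1, h2⟩

theorem foldl_sbbStep_max (K : String) (l : List (Int × String)) (acc : Option (Int × String))
    (b : Int × String) (h : l.foldl (sbbStep K) acc = some b) :
    (∀ c, acc = some c → c.1 ≤ b.1) ∧ (∀ q ∈ l, sbbKey q.2 = K → q.1 ≤ b.1) := by
  induction l generalizing acc with
  | nil =>
    simp only [List.foldl_nil] at h
    exact ⟨fun c hc => by rw [hc] at h; simp [Option.some_inj.mp h], by simp⟩
  | cons p rest ih =>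
    simp only [List.foldl_cons] at h
    obtain ⟨ihacc, ihrest⟩ := ih _ h
    have hstep : ∀ c, acc = some c → ∃ c', sbbStep K acc p = some c' ∧ c.1 ≤ c'.1 := by
      intro c hc
      subst hc
      by_cases hk : sbbKey p.2 = K
      · simp only [sbbStep, hk, if_true]
        by_cases hlt : c.1 < p.1
        · exact ⟨p, by simp [hlt], le_of_lt hlt⟩
        · exact ⟨c, by simp [hlt], le_refl _⟩
      · exact ⟨c, by simp [sbbStep, hk], le_refl _⟩
    constructor
    · intro c hc
      obtain ⟨c', hc', hle⟩ := hstep c hc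
      exact le_trans hle (ihacc c' hc')
    · intro q hq hqk
      rcases List.mem_cons.mp hq with rfl | hq'
      · have : ∃ c', sbbStep K acc q = some c' ∧ q.1 ≤ c'.1 := by
          cases acc with
          | none => exact ⟨q, by simp [sbbStep, hqk], le_refl _⟩
          | some c =>
            by_cases hlt : c.1 < q.1
            · exact ⟨q, by simp [sbbStep, hqk, hlt], le_refl _⟩
            · exact ⟨c, by simp [sbbStep, hqk, hlt], by omega⟩
        obtain ⟨c', hc', hle⟩ := this
        exact le_trans hle (ihacc c' hc')
      · exact ihrest q hq' hqk

theorem sbbBestOf_none_iff (K : String) (l : List (Int × String)) :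
    sbbBestOf K l = none ↔ ∀ q ∈ l, sbbKey q.2 ≠ K := by
  rw [sbbBestOf, foldl_sbbStep_none_iff]
  simp

theorem sbbBestOf_some_mem (K : String) (l : List (Int × String)) (b : Int × String)
    (h : sbbBestOf K l = some b) : b ∈ l ∧ sbbKey b.2 = K := by
  rcases foldl_sbbStep_some_mem K l none b h with h' | h'
  · exact absurd h' (by simp)
  · exact h'

theorem sbbBestOf_max (K : String) (l : List (Int × String)) (b : Int × String)
    (h : sbbBestOf K l = some b) : ∀ q ∈ l, sbbKey q.2 = K → q.1 ≤ b.1 :=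
  (foldl_sbbStep_max K l none b h).2

theorem insertBy_eq_takeWhile_dropWhile (b : (Int × String) → (Int × String) → Bool)
    (x : Int × String) (l : List (Int × String)) :
    PySem.List.insertBy b x l = l.takeWhile (fun y => !b x y) ++ x :: l.dropWhile (fun y => !b x y) := by
  induction l with
  | nil => simp [PySem.List.insertBy]
  | cons y ys ih =>
    by_cases hb : b x y = true
    · simp [PySem.List.insertBy, hb, List.takeWhile_cons, List.dropWhile_cons]
    · simp only [Bool.not_eq_true] at hb
      simp [PySem.List.insertBy, hb, List.takeWhile_cons, List.dropWhile_cons, ih]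

theorem sbbSorted_snoc (cand : List (Int × String)) (x : Int × String) :
    sbbSorted (cand ++ [x])
      = PySem.List.insertBy (fun a b => decide (sbbK a < sbbK b)) x (sbbSorted cand) := by
  rw [sbbSorted, sbbSorted, PySem.List.sorted_eq_foldl_insertBy, PySem.List.sorted_eq_foldl_insertBy,
    List.foldl_append, List.foldl_cons, List.foldl_nil]

theorem mem_dropWhile_lt (x : Int × String) (l : List (Int × String))
    (hp : l.Pairwise (fun a b => sbbK a ≤ sbbK b)) (q : Int × String)
    (hq : q ∈ l.dropWhile (fun y => !decide (sbbK x < sbbK y))) : sbbK x < sbbK q := by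
  induction l with
  | nil => simp at hq
  | cons y ys ih =>
    rw [List.dropWhile_cons] at hq
    by_cases hb : sbbK x < sbbK y
    · simp only [decide_eq_true hb, Bool.not_true, Bool.false_eq_true, if_false] at hq
      rcases List.mem_cons.mp hq with rfl | hq'
      · exact hb
      · exact lt_of_lt_of_le hb ((List.pairwise_cons.mp hp).1 q hq')
    · simp only [decide_eq_false hb, Bool.not_false, if_true] at hq
      exact ih (List.pairwise_cons.mp hp).2 hq

theorem contains_foldl_add (u : List (Int × String)) (s : PySem.Set String) (j : String) :
    PySem.Set.contains (u.foldl (fun s q => PySem.Set.add s (sbbKey q.2)) s) j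
      = (PySem.Set.contains s j || u.any (fun q => sbbKey q.2 == j)) := by
  induction u generalizing s with
  | nil => simp
  | cons q u ih =>
    have hbc : (j == sbbKey q.2) = (sbbKey q.2 == j) := by
      rw [Bool.eq_iff_iff]
      simp only [beq_iff_eq]
      exact eq_comm
    simp only [List.foldl_cons, List.any_cons, ih, setContains_add, hbc, Bool.or_assoc]

theorem contains_empty_set (j : String) : PySem.Set.contains PySem.Set.empty j = false := rfl

theorem mem_sbbDedup_sorted_iff_bestOf (cand : List (Int × String)) (p : Int × String) :
    p ∈ sbbDedup (sbbSorted cand) PySem.Set.empty ↔ sbbBestOf (sbbKey p.2) cand = some p := by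
  induction cand using List.reverseRecOn with
  | nil => simp [sbbSorted, PySem.List.sorted, sbbDedup, sbbBestOf, PySem.List.insertBy]
  | append_singleton cand x ih =>
    have hbo : ∀ K, sbbBestOf K (cand ++ [x]) = sbbStep K (sbbBestOf K cand) x := by
      intro K; rw [sbbBestOf, sbbBestOf, List.foldl_append, List.foldl_cons, List.foldl_nil]
    set bf := fun a b => decide (sbbK a < sbbK b) with hbf
    set u := (sbbSorted cand).takeWhile (fun y => !bf x y) with hu
    set v := (sbbSorted cand).dropWhile (fun y => !bf x y) with hv
    have hsplit : sbbSorted (cand ++ [x]) = u ++ x :: v := by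
      rw [sbbSorted_snoc, insertBy_eq_takeWhile_dropWhile]
    have huv : sbbSorted cand = u ++ v := (List.takeWhile_append_dropWhile).symm
    have hpair : (sbbSorted cand).Pairwise (fun a b => sbbK a ≤ sbbK b) :=
      PySem.List.sorted_pairwise cand sbbK
    have hfu : ∀ y ∈ u, sbbK y ≤ sbbK x := by
      intro y hy
      have := List.mem_takeWhile_imp hy
      simp only [hbf, Bool.not_eq_true', decide_eq_false_iff_not, not_lt] at this
      exact this
    have hfv : ∀ q ∈ v, sbbK x < sbbK q := fun q hq => mem_dropWhile_lt x _ hpair q hq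
    set S := u.foldl (fun s q => PySem.Set.add s (sbbKey q.2)) PySem.Set.empty with hS
    have hLHS : sbbDedup (sbbSorted (cand ++ [x])) PySem.Set.empty
        = sbbDedup u PySem.Set.empty ++ sbbDedup (x :: v) S := by
      rw [hsplit, sbbDedup_append]
    by_cases H1 : ∃ y ∈ u, sbbKey y.2 = sbbKey x.2
    · obtain ⟨y, hyu, hyk⟩ := H1
      have hcS : PySem.Set.contains S (sbbKey x.2) = true := by
        rw [hS, contains_foldl_add, contains_empty_set, Bool.false_or, List.any_eq_true]
        exact ⟨y, hyu, beq_iff_eq.mpr hyk⟩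
      have hL : sbbDedup (sbbSorted (cand ++ [x])) PySem.Set.empty
          = sbbDedup (sbbSorted cand) PySem.Set.empty := by
        rw [hLHS, huv, sbbDedup_append, ← hS]
        congr 1
        simp only [sbbDedup, hcS, if_true]
      rw [hL, ih, hbo]
      have hyc : y ∈ cand := by
        have : y ∈ sbbSorted cand := by rw [huv]; exact List.mem_append_left _ hyu
        rwa [sbbSorted, PySem.List.mem_sorted] at this
      by_cases hpk : sbbKey p.2 = sbbKey x.2
      · cases hbc : sbbBestOf (sbbKey p.2) cand with
        | none =>
          exfalso
          exact (sbbBestOf_none_iff _ _).mp hbc y hyc (by rw [hyk, hpk])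
        | some b =>
          have hxy : x.1 ≤ y.1 := lex_score_le y x hyk (hfu y hyu)
          have hyb : y.1 ≤ b.1 := sbbBestOf_max _ _ _ hbc y hyc (by rw [hyk, hpk])
          have : ¬ b.1 < x.1 := by omega
          simp [sbbStep, hpk, this]
      · have hpk' : ¬ sbbKey x.2 = sbbKey p.2 := fun h => hpk h.symm
        simp [sbbStep, hpk']
    · push_neg at H1
      have hcS : PySem.Set.contains S (sbbKey x.2) = false := by
        rw [hS, contains_foldl_add, contains_empty_set, Bool.false_or]
        rw [List.any_eq_false]
        intro y hy
        simpa using H1 y hy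
      have hL : sbbDedup (sbbSorted (cand ++ [x])) PySem.Set.empty
          = sbbDedup u PySem.Set.empty ++ x :: sbbDedup v (PySem.Set.add S (sbbKey x.2)) := by
        rw [hLHS]
        congr 1
        simp only [sbbDedup, hcS, Bool.false_eq_true, if_false]
      rw [hL, hbo]
      by_cases hpk : sbbKey p.2 = sbbKey x.2
      · have hstepx : sbbStep (sbbKey p.2) (sbbBestOf (sbbKey p.2) cand) x = some x := by
          cases hbc : sbbBestOf (sbbKey p.2) cand with
          | none => simp [sbbStep, hpk]
          | some b =>
            obtain ⟨hbc1, hbc2⟩ := sbbBestOf_some_mem _ _ _ hbc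
            have hbO : b ∈ sbbSorted cand := by rw [sbbSorted, PySem.List.mem_sorted]; exact hbc1
            rw [huv] at hbO
            rcases List.mem_append.mp hbO with hbu | hbv
            · exact absurd (by rw [hbc2, hpk]) (H1 b hbu)
            · have : b.1 < x.1 := lex_score_lt x b (by rw [hbc2, hpk]) (hfv b hbv)
              simp [sbbStep, hpk, this]
        rw [hstepx]
        constructor
        · intro hmem
          rcases List.mem_append.mp hmem with hmu | hmv
          · exact absurd hpk (by
              have := (mem_sbbDedup_key _ _ _ hmu).2
              exact H1 p this)
          · rcases List.mem_cons.mp hmv with rfl | hmv'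
            · rfl
            · exfalso
              have := (mem_sbbDedup_key _ _ _ hmv').1
              rw [hpk, setContains_add] at this
              simp at this
        · intro hsome
          have : p = x := (Option.some_inj.mp hsome).symm
          subst this
          exact List.mem_append_right _ List.mem_cons_self
      · have hstepx : sbbStep (sbbKey p.2) (sbbBestOf (sbbKey p.2) cand) x
            = sbbBestOf (sbbKey p.2) cand := by
          have hpk' : ¬ sbbKey x.2 = sbbKey p.2 := fun h => hpk h.symm
          simp [sbbStep, hpk']
        rw [hstepx, ← ih, huv, sbbDedup_append, ← hS]
        rw [sbbDedup_add]
        constructor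
        · intro hmem
          rcases List.mem_append.mp hmem with hmu | hmv
          · exact List.mem_append_left _ hmu
          · rcases List.mem_cons.mp hmv with rfl | hmv'
            · exact absurd rfl hpk
            · exact List.mem_append_right _ (List.mem_of_mem_filter hmv')
        · intro hmem
          rcases List.mem_append.mp hmem with hmu | hmv
          · exact List.mem_append_left _ hmu
          · refine List.mem_append_right _ (List.mem_cons_of_mem _ ?_)
            rw [List.mem_filter]
            exact ⟨hmv, by simpa using hpk⟩

theorem sbbBestStepFun : (fun (best : PySem.Dict String (Int × String)) (p : Int × String) =>
    let key := sbbKey p.2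
    match best.get? key with
    | none => best.insert key p
    | some prev => if prev.1 < p.1 then best.insert key p else best) = (fun best p =>
    match best.get? (sbbKey p.2) with
    | none => best.insert (sbbKey p.2) p
    | some prev => if prev.1 < p.1 then best.insert (sbbKey p.2) p else best) := rfl

theorem get?_foldl_sbbBest (l : List (Int × String)) (d : PySem.Dict String (Int × String))
    (K : String) (acc : Option (Int × String)) (hacc : d.get? K = acc) :
    (l.foldl (fun best p =>
      match best.get? (sbbKey p.2) with
      | none => best.insert (sbbKey p.2) p
      | some prev => if prev.1 < p.1 then best.insert (sbbKey p.2) p else best) d).get? K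
      = l.foldl (sbbStep K) acc := by
  induction l generalizing d acc with
  | nil => simpa using hacc
  | cons p rest ih =>
    simp only [List.foldl_cons]
    apply ih
    by_cases hK : K = sbbKey p.2
    · subst hK
      rw [hacc]
      cases acc with
      | none => simp [sbbStep, PySem.Dict.get?_insert_self]
      | some prev =>
        by_cases hlt : prev.1 < p.1
        · simp [sbbStep, hlt, PySem.Dict.get?_insert_self]
        · simp only [sbbStep, if_pos rfl, if_neg hlt]
          exact hacc
    · have hne : ¬ sbbKey p.2 = K := fun h => hK h.symm
      have hstep : sbbStep K acc p = acc := by simp [sbbStep, hne]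
      rw [hstep]
      cases hgp : d.get? (sbbKey p.2) with
      | none => rw [PySem.Dict.get?_insert_of_ne _ _ hK, hacc]
      | some prev =>
        by_cases hlt : prev.1 < p.1
        · simp only [hlt, if_true]
          rw [PySem.Dict.get?_insert_of_ne _ _ hK, hacc]
        · simp [hlt, hacc]

theorem get?_sbbBest (cand : List (Int × String)) (K : String) :
    (sbbBest cand).get? K = sbbBestOf K cand := by
  rw [sbbBest, sbbBestStepFun, sbbBestOf]
  exact get?_foldl_sbbBest cand PySem.Dict.empty K none (by simp [PySem.Dict.get?_empty])

theorem nodup_keys_foldl_sbbBest (l : List (Int × String)) (d : PySem.Dict String (Int × String))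
    (hd : d.keys.Nodup) :
    (l.foldl (fun best p =>
      match best.get? (sbbKey p.2) with
      | none => best.insert (sbbKey p.2) p
      | some prev => if prev.1 < p.1 then best.insert (sbbKey p.2) p else best) d).keys.Nodup := by
  induction l generalizing d with
  | nil => simpa using hd
  | cons p rest ih =>
    simp only [List.foldl_cons]
    apply ih
    cases d.get? (sbbKey p.2) with
    | none => exact PySem.Dict.nodup_keys_insert _ _ _ hd
    | some prev =>
      by_cases hlt : prev.1 < p.1
      · simp only [hlt, if_true]; exact PySem.Dict.nodup_keys_insert _ _ _ hd
      · simpa [hlt] using hd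

theorem nodup_keys_sbbBest (cand : List (Int × String)) : (sbbBest cand).keys.Nodup := by
  rw [sbbBest, sbbBestStepFun]
  exact nodup_keys_foldl_sbbBest cand PySem.Dict.empty PySem.Dict.nodup_keys_empty

theorem key_of_mem_items_sbbBest (cand : List (Int × String)) (k : String) (v : Int × String)
    (h : (k, v) ∈ (sbbBest cand).items) : sbbKey v.2 = k := by
  rw [sbbBest, sbbBestStepFun] at h
  suffices H : ∀ (l : List (Int × String)) (d : PySem.Dict String (Int × String)),
      (∀ k' v', (k', v') ∈ d.items → sbbKey v'.2 = k') →
      ∀ k' v', (k', v') ∈ (l.foldl (fun best p =>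
        match best.get? (sbbKey p.2) with
        | none => best.insert (sbbKey p.2) p
        | some prev => if prev.1 < p.1 then best.insert (sbbKey p.2) p else best) d).items →
      sbbKey v'.2 = k' by
    exact H cand PySem.Dict.empty (by intro k' v' hkv; simp [PySem.Dict.empty] at hkv) k v h
  intro l
  induction l with
  | nil => intro d hd; simpa using hd
  | cons p rest ih =>
    intro d hd
    simp only [List.foldl_cons]
    apply ih
    intro k' v' hmem
    cases hgp : d.get? (sbbKey p.2) with
    | none =>
      rw [hgp] at hmem
      rcases (PySem.Dict.mem_items_insert _ _ _ _).mp hmem with h' | ⟨h', _⟩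
      · cases h'; rfl
      · exact hd _ _ h'
    | some prev =>
      rw [hgp] at hmem
      by_cases hlt : prev.1 < p.1
      · simp only [hlt, if_true] at hmem
        rcases (PySem.Dict.mem_items_insert _ _ _ _).mp hmem with h' | ⟨h', _⟩
        · cases h'; rfl
        · exact hd _ _ h'
      · simp only [hlt, if_false] at hmem
        exact hd _ _ hmem

theorem mem_values_sbbBest_iff (cand : List (Int × String)) (p : Int × String) :
    p ∈ (sbbBest cand).values ↔ (sbbBest cand).get? (sbbKey p.2) = some p := by
  constructor
  · intro h
    have hv : (sbbBest cand).values = (sbbBest cand).items.map Prod.snd := rfl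
    rw [hv, List.mem_map] at h
    obtain ⟨⟨k, v⟩, hmem, hv2⟩ := h
    subst hv2
    rw [key_of_mem_items_sbbBest cand k v hmem]
    exact PySem.Dict.get?_of_mem_items _ hmem (nodup_keys_sbbBest cand)
  · intro h
    have hmem := PySem.Dict.mem_items_of_get?_eq_some _ h
    have hv : (sbbBest cand).values = (sbbBest cand).items.map Prod.snd := rfl
    rw [hv, List.mem_map]
    exact ⟨_, hmem, rfl⟩

theorem nodup_values_sbbBest (cand : List (Int × String)) : (sbbBest cand).values.Nodup := by
  have hmap : (sbbBest cand).values.map (fun p => sbbKey p.2) = (sbbBest cand).keys := by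
    have hv : (sbbBest cand).values = (sbbBest cand).items.map Prod.snd := rfl
    have hk : (sbbBest cand).keys = (sbbBest cand).items.map Prod.fst := rfl
    rw [hv, hk, List.map_map]
    apply List.map_congr_left
    intro ⟨k, v⟩ hmem
    exact key_of_mem_items_sbbBest cand k v hmem
  exact List.Nodup.of_map _ (hmap ▸ nodup_keys_sbbBest cand)

theorem sorted_values_eq_dedup (cand : List (Int × String)) :
    sbbSorted (sbbBest cand).values = sbbDedup (sbbSorted cand) PySem.Set.empty := by
  rw [sbbSorted]
  apply PySem.List.sorted_eq_of_perm_of_pairwise_lt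
  · rw [List.perm_ext_iff_of_nodup
      (List.Nodup.of_map _ (nodup_map_key_sbbDedup (sbbSorted cand) PySem.Set.empty))
      (nodup_values_sbbBest cand)]
    intro p
    rw [mem_sbbDedup_sorted_iff_bestOf, mem_values_sbbBest_iff, get?_sbbBest]
  · have hle : (sbbDedup (sbbSorted cand) PySem.Set.empty).Pairwise (fun a b => sbbK a ≤ sbbK b) :=
      (PySem.List.sorted_pairwise cand sbbK).sublist (sublist_sbbDedup _ _)
    have hne : (sbbDedup (sbbSorted cand) PySem.Set.empty).Pairwise
        (fun a b => sbbKey a.2 ≠ sbbKey b.2) := by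
      have := nodup_map_key_sbbDedup (sbbSorted cand) PySem.Set.empty
      rwa [List.nodup_iff_pairwise_ne, List.pairwise_map] at this
    refine (hle.and hne).imp ?_
    rintro a b ⟨h1, h2⟩
    refine lt_of_le_of_ne h1 ?_
    intro heq
    apply h2
    have : ((-a.1 : Int), sbbKey a.2) = ((-b.1 : Int), sbbKey b.2) := by
      simpa [sbbK] using heq
    exact (Prod.mk.injEq _ _ _ _ ▸ this).2

-- ===== VERDICT (by name: the statement is the Claim_ definition above) =====
theorem select_best_bullets_spec : Claim_equal_select_best_bullets := by
  intro candidates limit _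
  unfold Spec_select_best_bullets select_best_bullets select_best_bullets_alt
  rw [sorted2_eq_sorted_lex, sorted2_eq_sorted_lex, loopA_eq_loopB, sorted_values_eq_dedup]
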